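-- pv_equiv track=rewrite | github.com/exabounds/IBM-Appresentor | scripts/validator.py | param2flags
-- ===== SOURCE A (Python) =====
-- def value2name(what, none_is_actually_a_size = False):
-- 	if what == 0:
-- 		return 'none'
-- 	if what == 1:
-- 		if not none_is_actually_a_size:
-- 			return 'smart'
-- 	if what == 2:
-- 		if not none_is_actually_a_size:
-- 			return 'max'
-- 	if what == -1:
-- 		return 'auto'
-- 	return str(int(what))
--
-- def param2flags(parameters):
--
-- 	# declare the optimization flag
-- 	flags = []
--
--
--
-- 	# compose the tiling
-- 	values = {}
-- 	tile_flag = ''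
-- 	for p in parameters:
-- 		if 'tile' in p and 'tileL2' not in p:
-- 			values[int(p[5:])] = int(parameters[p])
-- 	tile_value = ''
-- 	for v in range(len(values)):
-- 		tile_value = '{0},{1}'.format(tile_value, value2name(values[v], none_is_actually_a_size=True))
-- 	if tile_value:
-- 		tile_value = tile_value[1:]
-- 		tile_flag = '--tile {0}'.format(tile_value)
--
--
--
-- 	# compose the L2 tiling
-- 	values = {}
-- 	tileL2_flag = ''
-- 	for p in parameters:
-- 		if 'tileL2' in p:
-- 			values[int(p[7:])] = int(parameters[p])
-- 	tile_valueL2 = ''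
-- 	for v in range(len(values)):
-- 		tile_valueL2 = '{0},{1}'.format(tile_valueL2, value2name(values[v], none_is_actually_a_size=True))
-- 	if tile_valueL2:
-- 		tile_valueL2 = tile_valueL2[1:]
-- 		tileL2_flag = '--tileL2 {0}'.format(tile_valueL2)
--
--
--
--
-- 	# compose the loop unrolling
-- 	unrolling_factor = ''
-- 	for p in parameters:
-- 		if 'unrolling' == p:
-- 			unrolling_factor = '--unrolling {0}'.format(str(int(parameters[p])))
--
--
--
--
-- 	# compose the fusion policy
-- 	fusion_policy = ''
-- 	for p in parameters:
-- 		if 'fusion' == p: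
-- 			fusion_policy = '--fusion {0}'.format(value2name(parameters[p]))
--
--
--
-- 	# compose the automatic parallelization
-- 	parallel_auto = ''
-- 	for p in parameters:
-- 		if 'parallel' == p:
-- 			parallel_auto = '--parallel {0}'.format(value2name(parameters[p]))
--
--
-- 	# compose the vectorization
-- 	vectorization = ''
-- 	for p in parameters:
-- 		if 'vectorization' == p:
-- 			vectorization = '--vectorization {0}'.format(value2name(parameters[p]))
--
--
--
--
-- 	# compose the optimization flags
-- 	flags.append('OPTIMIZATION_FLAGS={0} {1} {2} {3} {4}'.format(tile_flag, tileL2_flag, unrolling_factor, fusion_policy, parallel_auto, vectorization))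
--
--
-- 	# compose the remainder of the flag
-- 	for p in parameters:
--
-- 		# filter in the actual parameters
-- 		if not (('tile' in p) or ('unrolling' in p) or ('fusion' in p) or ('estimanteExTime' in p) or ('estimatedExTimeModelFromPrunedDOE' in p) or ('parallel' in p) or ('OMP' in p) or ('vectorization' in p)):
--
-- 			# otherwise compose the value
-- 			flags.append('{0}={1}'.format(p, str(int(parameters[p]))))
--
--
-- 	# return the list of flags and the number of OpenMP processes
-- 	return flags, int(parameters['OMP'])
-- ===== SOURCE B (Python) =====
-- def value2name(what, none_is_actually_a_size=False):
-- 	table = {0: 'none', -1: 'auto'}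
-- 	if not none_is_actually_a_size:
-- 		table.update({1: 'smart', 2: 'max'})
-- 	if what in table:
-- 		return table[what]
-- 	return str(int(what))
--
-- def param2flags(parameters):
-- 	tiles, tilesL2, scalars, other = {}, {}, {}, []
-- 	for p, v in parameters.items():
-- 		if 'tileL2' in p:
-- 			tilesL2[int(p[7:])] = int(v)
-- 		elif 'tile' in p:
-- 			tiles[int(p[5:])] = int(v)
-- 		if p in ('unrolling', 'fusion', 'parallel'):
-- 			scalars[p] = v
-- 		if not ('tile' in p or 'unrolling' in p or 'fusion' in p or 'estimanteExTime' in p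
-- 		        or 'estimatedExTimeModelFromPrunedDOE' in p or 'parallel' in p
-- 		        or 'OMP' in p or 'vectorization' in p):
-- 			other.append('{0}={1}'.format(p, str(int(v))))
--
-- 	def csv(d):
-- 		return ','.join(value2name(d[i], none_is_actually_a_size=True) for i in range(len(d)))
--
-- 	tile_flag = '--tile ' + csv(tiles) if tiles else ''
-- 	tileL2_flag = '--tileL2 ' + csv(tilesL2) if tilesL2 else ''
-- 	unrolling = '--unrolling {0}'.format(str(int(scalars['unrolling']))) if 'unrolling' in scalars else ''
-- 	fusion = '--fusion {0}'.format(value2name(scalars['fusion'])) if 'fusion' in scalars else ''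
-- 	parallel = '--parallel {0}'.format(value2name(scalars['parallel'])) if 'parallel' in scalars else ''
-- 	flags = ['OPTIMIZATION_FLAGS={0} {1} {2} {3} {4}'.format(tile_flag, tileL2_flag, unrolling, fusion, parallel)] + other
-- 	return flags, int(parameters['OMP'])
-- ===== Notes on version B (the rewrite author's own statement) =====
-- stated objective: alternative
-- what changed: A's seven separate passes over the parameter dict (tile, tileL2, unrolling, fusion, parallel, vectorization, remainder) are replaced by ONE classifying pass that builds the two tile dicts, a scalar dict and the ordered remainder list, followed by a join-based formatter ( ','.join + table-driven value2name ) instead of A's comma-prefix accumulation with [1:] and if-return chain.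
import Mathlib
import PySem

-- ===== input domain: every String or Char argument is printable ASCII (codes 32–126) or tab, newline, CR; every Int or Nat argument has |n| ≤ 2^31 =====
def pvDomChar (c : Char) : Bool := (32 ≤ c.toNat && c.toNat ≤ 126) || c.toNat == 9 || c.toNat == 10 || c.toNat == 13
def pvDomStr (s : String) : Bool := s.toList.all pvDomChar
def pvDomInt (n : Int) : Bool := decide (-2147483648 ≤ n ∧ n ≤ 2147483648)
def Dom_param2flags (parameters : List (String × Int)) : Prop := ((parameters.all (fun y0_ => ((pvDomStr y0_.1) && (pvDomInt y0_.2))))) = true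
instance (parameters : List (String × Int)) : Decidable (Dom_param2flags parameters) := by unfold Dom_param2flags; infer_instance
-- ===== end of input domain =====

-- B re-implements A's seven separate passes over the dict as ONE classifying pass plus a
-- join-based formatter (objective: simpler/alternative decomposition; same exact output).

-- ===== PORT A =====
-- value2name, transliterated (the sequential 'if … return' chain of A)
def pvValue2name (what : Int) (noneIsSize : Bool) : List Char :=
  if what = 0 then "none".toList
  else if what = 1 ∧ noneIsSize = false then "smart".toList
  else if what = 2 ∧ noneIsSize = false then "max".toList
  else if what = -1 then "auto".toList
  else PySem.Int.toChars what

-- A's per-pass loop bodies, one def per Python 'for' loop (strings handled as List Char)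
def pvTileStepA (d : PySem.Dict Int Int) (q : String × Int) : PySem.Dict Int Int :=
  if PySem.Chars.isIn "tile".toList q.1.toList && !(PySem.Chars.isIn "tileL2".toList q.1.toList) then
    -- int(p[5:]) raises ValueError when the slice is not int-like: Pre_ excludes that (getD 0 is never reached inside Pre_)
    d.insert ((PySem.Int.ofChars? (PySem.List.slice q.1.toList (some 5) none)).getD 0) q.2
  else d

def pvTileL2StepA (d : PySem.Dict Int Int) (q : String × Int) : PySem.Dict Int Int :=
  if PySem.Chars.isIn "tileL2".toList q.1.toList then
    d.insert ((PySem.Int.ofChars? (PySem.List.slice q.1.toList (some 7) none)).getD 0) q.2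
  else d

-- A's remainder filter (the literal or-chain of the final loop)
def pvKeepA (q : String × Int) : Bool :=
  !(PySem.Chars.isIn "tile".toList q.1.toList || PySem.Chars.isIn "unrolling".toList q.1.toList ||
    PySem.Chars.isIn "fusion".toList q.1.toList || PySem.Chars.isIn "estimanteExTime".toList q.1.toList ||
    PySem.Chars.isIn "estimatedExTimeModelFromPrunedDOE".toList q.1.toList ||
    PySem.Chars.isIn "parallel".toList q.1.toList || PySem.Chars.isIn "OMP".toList q.1.toList ||
    PySem.Chars.isIn "vectorization".toList q.1.toList)

def param2flags (parameters : List (String × Int)) : List String × Int :=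
  -- compose the tiling
  let values := parameters.foldl pvTileStepA PySem.Dict.empty
  -- values[v] raises KeyError for non-contiguous indices: Pre_ excludes that, getD 0 is never reached inside Pre_
  let tile_value := (List.range values.size).foldl
    (fun s v => s ++ ",".toList ++ pvValue2name (values.getD (Int.ofNat v) 0) true) []
  let tile_flag := if tile_value ≠ [] then "--tile ".toList ++ PySem.List.slice tile_value (some 1) none else []
  -- compose the L2 tiling
  let valuesL2 := parameters.foldl pvTileL2StepA PySem.Dict.empty
  let tile_valueL2 := (List.range valuesL2.size).foldl
    (fun s v => s ++ ",".toList ++ pvValue2name (valuesL2.getD (Int.ofNat v) 0) true) []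
  let tileL2_flag := if tile_valueL2 ≠ [] then "--tileL2 ".toList ++ PySem.List.slice tile_valueL2 (some 1) none else []
  -- compose the loop unrolling
  let unrolling_factor := parameters.foldl
    (fun s q => if q.1 = "unrolling" then "--unrolling ".toList ++ PySem.Int.toChars q.2 else s) ([] : List Char)
  -- compose the fusion policy
  let fusion_policy := parameters.foldl
    (fun s q => if q.1 = "fusion" then "--fusion ".toList ++ pvValue2name q.2 false else s) ([] : List Char)
  -- compose the automatic parallelization
  let parallel_auto := parameters.foldl
    (fun s q => if q.1 = "parallel" then "--parallel ".toList ++ pvValue2name q.2 false else s) ([] : List Char)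
  -- compose the vectorization (computed and then dropped: the format string has only five slots)
  let _vectorization := parameters.foldl
    (fun s q => if q.1 = "vectorization" then "--vectorization ".toList ++ pvValue2name q.2 false else s) ([] : List Char)
  -- compose the optimization flags
  let flags := ["OPTIMIZATION_FLAGS=".toList ++ tile_flag ++ " ".toList ++ tileL2_flag ++ " ".toList ++
                unrolling_factor ++ " ".toList ++ fusion_policy ++ " ".toList ++ parallel_auto]
  -- compose the remainder of the flag
  let flags := parameters.foldl
    (fun fs q => if pvKeepA q then fs ++ [q.1.toList ++ "=".toList ++ PySem.Int.toChars q.2] else fs) flags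
  -- parameters['OMP'] raises KeyError when absent: Pre_ excludes that
  (flags.map String.ofList, ((PySem.Dict.ofList parameters).get? "OMP").getD 0)

-- ===== PORT B =====
-- B's table-driven value2name
def pvTable (noneIsSize : Bool) : PySem.Dict Int (List Char) :=
  let t := (PySem.Dict.empty.insert 0 "none".toList).insert (-1) "auto".toList
  if noneIsSize = false then (t.insert 1 "smart".toList).insert 2 "max".toList else t

def pvName (what : Int) (noneIsSize : Bool) : List Char :=
  match (pvTable noneIsSize).get? what with
  | some s => s
  | none => PySem.Int.toChars what

def pvKeepB (q : String × Int) : Bool :=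
  !(PySem.Chars.isIn "tile".toList q.1.toList || PySem.Chars.isIn "unrolling".toList q.1.toList ||
    PySem.Chars.isIn "fusion".toList q.1.toList || PySem.Chars.isIn "estimanteExTime".toList q.1.toList ||
    PySem.Chars.isIn "estimatedExTimeModelFromPrunedDOE".toList q.1.toList ||
    PySem.Chars.isIn "parallel".toList q.1.toList || PySem.Chars.isIn "OMP".toList q.1.toList ||
    PySem.Chars.isIn "vectorization".toList q.1.toList)

-- B's single classifying pass: state = (tiles, tilesL2, scalars, other)
def pvStepB (st : PySem.Dict Int Int × PySem.Dict Int Int × PySem.Dict String Int × List (List Char))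
    (q : String × Int) :
    PySem.Dict Int Int × PySem.Dict Int Int × PySem.Dict String Int × List (List Char) :=
  let (tiles, tilesL2, scalars, other) := st
  let (tiles, tilesL2) :=
    if PySem.Chars.isIn "tileL2".toList q.1.toList then
      (tiles, tilesL2.insert ((PySem.Int.ofChars? (PySem.List.slice q.1.toList (some 7) none)).getD 0) q.2)
    else if PySem.Chars.isIn "tile".toList q.1.toList then
      (tiles.insert ((PySem.Int.ofChars? (PySem.List.slice q.1.toList (some 5) none)).getD 0) q.2, tilesL2)
    else (tiles, tilesL2)
  let scalars := if q.1 = "unrolling" ∨ q.1 = "fusion" ∨ q.1 = "parallel" then scalars.insert q.1 q.2 else scalars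
  let other := if pvKeepB q then other ++ [q.1.toList ++ "=".toList ++ PySem.Int.toChars q.2] else other
  (tiles, tilesL2, scalars, other)


-- B's csv helper: ','.join(value2name(d[i], True) for i in range(len(d)))
def pvCsv (d : PySem.Dict Int Int) : List Char :=
  PySem.Chars.join ",".toList ((List.range d.size).map (fun i => pvName (d.getD (Int.ofNat i) 0) true))

def param2flags_alt (parameters : List (String × Int)) : List String × Int :=
  let st := parameters.foldl pvStepB (PySem.Dict.empty, PySem.Dict.empty, PySem.Dict.empty, [])
  let tiles := st.1
  let tilesL2 := st.2.1
  let scalars := st.2.2.1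
  let other := st.2.2.2
  let tile_flag := if tiles.size ≠ 0 then "--tile ".toList ++ pvCsv tiles else []
  let tileL2_flag := if tilesL2.size ≠ 0 then "--tileL2 ".toList ++ pvCsv tilesL2 else []
  let unrolling := match scalars.get? "unrolling" with
    | some v => "--unrolling ".toList ++ PySem.Int.toChars v
    | none => []
  let fusion := match scalars.get? "fusion" with
    | some v => "--fusion ".toList ++ pvName v false
    | none => []
  let parallel := match scalars.get? "parallel" with
    | some v => "--parallel ".toList ++ pvName v false
    | none => []
  let line := "OPTIMIZATION_FLAGS=".toList ++ tile_flag ++ " ".toList ++ tileL2_flag ++ " ".toList ++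
              unrolling ++ " ".toList ++ fusion ++ " ".toList ++ parallel
  ((line :: other).map String.ofList, ((PySem.Dict.ofList parameters).get? "OMP").getD 0)

-- ===== PRECONDITION & SPEC =====
-- shape helpers for Pre_ (closed-form conditions on the input only)
def pvIsTileKey (p : String) : Bool :=
  PySem.Chars.isIn "tile".toList p.toList && !(PySem.Chars.isIn "tileL2".toList p.toList)
def pvIsTileL2Key (p : String) : Bool := PySem.Chars.isIn "tileL2".toList p.toList
def pvTileIdx? (p : String) : Option Int := PySem.Int.ofChars? (p.toList.drop 5)
def pvTileL2Idx? (p : String) : Option Int := PySem.Int.ofChars? (p.toList.drop 7)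
def pvTileIdxs (parameters : List (String × Int)) : List Int :=
  PySem.List.dedup ((parameters.filter (fun q => pvIsTileKey q.1)).map (fun q => (pvTileIdx? q.1).getD 0))
def pvTileL2Idxs (parameters : List (String × Int)) : List Int :=
  PySem.List.dedup ((parameters.filter (fun q => pvIsTileL2Key q.1)).map (fun q => (pvTileL2Idx? q.1).getD 0))

-- Pre_ excludes exactly where Python A raises — no 'OMP' key (KeyError), a tile/tileL2 key whose
-- sliced suffix is not int-like (ValueError), non-contiguous tile indices (KeyError in values[v]) —
-- plus association lists with duplicate keys, on which the list form of a Python dict is ambiguous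
-- (later entries overwrite earlier ones in the real dict).
def Pre_param2flags (parameters : List (String × Int)) : Prop :=
  (parameters.map Prod.fst).Nodup ∧
  "OMP" ∈ parameters.map Prod.fst ∧
  (∀ q ∈ parameters, pvIsTileKey q.1 = true → (pvTileIdx? q.1).isSome = true) ∧
  (∀ q ∈ parameters, pvIsTileL2Key q.1 = true → (pvTileL2Idx? q.1).isSome = true) ∧
  (∀ k ∈ List.range (pvTileIdxs parameters).length, (k : Int) ∈ pvTileIdxs parameters) ∧
  (∀ k ∈ List.range (pvTileL2Idxs parameters).length, (k : Int) ∈ pvTileL2Idxs parameters)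
instance (parameters : List (String × Int)) : Decidable (Pre_param2flags parameters) := by
  unfold Pre_param2flags; infer_instance

def pvWitness_param2flags : (List (String × Int)) :=
  [("tile_0", 5), ("tile_1", 0), ("tileL2_0", -1), ("unrolling", 4), ("foo", 7), ("OMP", 2)]

def Spec_param2flags (parameters : List (String × Int)) (out : List String × Int) : Prop := out = param2flags_alt parameters
instance (parameters : List (String × Int)) (out : List String × Int) : Decidable (Spec_param2flags parameters out) := by unfold Spec_param2flags; infer_instance

-- ===== CLAIM (what is proved, stated in full; the proofs are below) =====
def Claim_equal_param2flags : Prop := ∀ (parameters : List (String × Int)), Dom_param2flags parameters → Pre_param2flags parameters → Spec_param2flags parameters (param2flags parameters)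


-- ===== LEMMAS AND PROOFS =====

-- proof-side names for the scalar/other components of B's single pass
def pvScalStep (s : PySem.Dict String Int) (q : String × Int) : PySem.Dict String Int :=
  if q.1 = "unrolling" ∨ q.1 = "fusion" ∨ q.1 = "parallel" then s.insert q.1 q.2 else s

def pvOtherStep (o : List (List Char)) (q : String × Int) : List (List Char) :=
  if pvKeepB q then o ++ [q.1.toList ++ "=".toList ++ PySem.Int.toChars q.2] else o

-- B's table lookup agrees with A's if-chain
theorem pvName_eq (w : Int) (b : Bool) : pvName w b = pvValue2name w b := by
  cases b <;> by_cases h0 : w = 0 <;> by_cases h1 : w = 1 <;> by_cases h2 : w = 2 <;> by_cases hm : w = -1 <;>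
    simp_all [pvName, pvTable, pvValue2name, PySem.Dict.get?_insert, PySem.Dict.get?_empty]

-- one step of B's pass is the tuple of the four independent steps of A
theorem pvStepB_eq (t t2 : PySem.Dict Int Int) (s : PySem.Dict String Int) (o : List (List Char))
    (q : String × Int) :
    pvStepB (t, t2, s, o) q = (pvTileStepA t q, pvTileL2StepA t2 q, pvScalStep s q, pvOtherStep o q) := by
  simp only [pvStepB, pvTileStepA, pvTileL2StepA, pvScalStep, pvOtherStep]
  by_cases h2 : PySem.Chars.isIn "tileL2".toList q.1.toList = true <;>
    by_cases h1 : PySem.Chars.isIn "tile".toList q.1.toList = true <;>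
      simp_all

-- B's single pass is A's four passes
theorem pvFold_split (ps : List (String × Int)) (t t2 : PySem.Dict Int Int)
    (s : PySem.Dict String Int) (o : List (List Char)) :
    ps.foldl pvStepB (t, t2, s, o) =
      (ps.foldl pvTileStepA t, ps.foldl pvTileL2StepA t2, ps.foldl pvScalStep s, ps.foldl pvOtherStep o) := by
  induction ps generalizing t t2 s o with
  | nil => rfl
  | cons q ps ih => simp only [List.foldl_cons, pvStepB_eq, ih]

-- lookup in the scalars dict after the pass = last-match option fold (k one of the three scalar keys)
theorem pvScal_get (k : String) (hk : k = "unrolling" ∨ k = "fusion" ∨ k = "parallel") :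
    ∀ (ps : List (String × Int)) (s : PySem.Dict String Int),
      (ps.foldl pvScalStep s).get? k = ps.foldl (fun o q => if q.1 = k then some q.2 else o) (s.get? k) := by
  intro ps
  induction ps with
  | nil => intro s; rfl
  | cons q ps ih =>
    intro s
    simp only [List.foldl_cons, pvScalStep]
    by_cases hq : q.1 = k
    · subst hq
      rw [if_pos hk, ih, PySem.Dict.get?_insert_self, if_pos rfl]
    · split_ifs with h
      · rw [ih, PySem.Dict.get?_insert_of_ne _ _ (fun hc => hq hc.symm)]
      · rw [ih]

-- A's overwrite-style string fold is the option fold rendered through F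
theorem pvStrFold (k : String) (F : Int → List Char) (ps : List (String × Int)) (o : Option Int) :
    ps.foldl (fun s q => if q.1 = k then F q.2 else s) (Option.elim o [] F) =
      Option.elim (ps.foldl (fun o q => if q.1 = k then some q.2 else o) o) [] F := by
  induction ps generalizing o with
  | nil => rfl
  | cons q ps ih =>
    simp only [List.foldl_cons]
    by_cases hq : q.1 = k
    · simp only [hq]
      have := ih (some q.2); simpa using this
    · simp [hq, ih o]

theorem pvStrFold_nil (k : String) (F : Int → List Char) (ps : List (String × Int)) :
    ps.foldl (fun s q => if q.1 = k then F q.2 else s) [] =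
      Option.elim (ps.foldl (fun o q => if q.1 = k then some q.2 else o) none) [] F :=
  pvStrFold k F ps none

-- the comma-accumulating fold collects ',' ++ piece for every piece
theorem pvCommaFold (l : List (List Char)) (a : List Char) :
    l.foldl (fun s x => s ++ ",".toList ++ x) a = a ++ l.flatMap (fun x => ",".toList ++ x) := by
  induction l generalizing a with
  | nil => simp
  | cons x l ih => simp [List.append_assoc, List.flatMap_def]

-- and that collection is ',' ++ join on a nonempty list
theorem pvFlatCommaNe (y : List Char) (t : List (List Char)) :
    (y :: t).flatMap (fun x => ",".toList ++ x) = ",".toList ++ PySem.Chars.join ",".toList (y :: t) := by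
  induction t generalizing y with
  | nil => simp [PySem.Chars.join_singleton]
  | cons z t ih =>
    rw [PySem.Chars.join_cons_cons]
    simp only [List.flatMap_cons, List.append_assoc] at *
    rw [ih z]

-- one tiling flag: A's range-fold + [1:] rendering = B's size test + join rendering
theorem pvTileFlag (d : PySem.Dict Int Int) (pre : List Char) :
    (if ((List.range d.size).foldl
          (fun s v => s ++ ",".toList ++ pvValue2name (d.getD (Int.ofNat v) 0) true) []) ≠ [] then
        pre ++ PySem.List.slice ((List.range d.size).foldl
          (fun s v => s ++ ",".toList ++ pvValue2name (d.getD (Int.ofNat v) 0) true) []) (some 1) none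
      else []) =
      (if d.size ≠ 0 then pre ++ pvCsv d else []) := by
  have hmap : (List.range d.size).foldl
      (fun s v => s ++ ",".toList ++ pvValue2name (d.getD (Int.ofNat v) 0) true) ([] : List Char) =
      ((List.range d.size).map (fun v => pvValue2name (d.getD (Int.ofNat v) 0) true)).foldl
        (fun s x => s ++ ",".toList ++ x) [] := by
    rw [List.foldl_map]
  by_cases h : d.size = 0
  · simp [h]
  · obtain ⟨m, hm⟩ : ∃ m, d.size = m + 1 :=
      ⟨d.size - 1, (Nat.succ_pred_eq_of_pos (Nat.pos_of_ne_zero h)).symm⟩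
    rw [hmap, pvCommaFold, List.nil_append, hm, List.range_succ_eq_map, List.map_cons,
      pvFlatCommaNe]
    rw [if_pos (by simp), if_pos (by omega : m + 1 ≠ 0)]
    rw [PySem.List.slice_from_one]
    have hcomma : ",".toList = [','] := rfl
    rw [hcomma, List.singleton_append, List.tail_cons]
    simp only [pvCsv, pvName_eq, hm, List.range_succ_eq_map, List.map_cons, hcomma]

-- ===== VERDICT (by name: the statement is the Claim_ definition above) =====
theorem param2flags_spec : Claim_equal_param2flags := by
  intro ps _ _
  show param2flags ps = param2flags_alt ps
  simp only [param2flags, param2flags_alt]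
  rw [pvFold_split]
  dsimp only
  rw [pvTileFlag, pvTileFlag]
  rw [pvStrFold_nil "unrolling" (fun v => "--unrolling ".toList ++ PySem.Int.toChars v) ps,
      pvStrFold_nil "fusion" (fun v => "--fusion ".toList ++ pvValue2name v false) ps,
      pvStrFold_nil "parallel" (fun v => "--parallel ".toList ++ pvValue2name v false) ps]
  rw [pvScal_get "unrolling" (Or.inl rfl) ps, pvScal_get "fusion" (Or.inr (Or.inl rfl)) ps,
      pvScal_get "parallel" (Or.inr (Or.inr rfl)) ps]
  simp only [PySem.Dict.get?_empty, pvName_eq]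
  rw [PySem.List.foldl_append_if pvKeepA (fun q => q.1.toList ++ "=".toList ++ PySem.Int.toChars q.2) ps]
  rw [show pvOtherStep = (fun (o : List (List Char)) (q : String × Int) =>
        if pvKeepB q = true then o ++ [q.1.toList ++ "=".toList ++ PySem.Int.toChars q.2] else o) from rfl]
  rw [PySem.List.foldl_append_if pvKeepB (fun q => q.1.toList ++ "=".toList ++ PySem.Int.toChars q.2) ps]
  have hkeep : pvKeepA = pvKeepB := rfl
  rw [hkeep]
  generalize (List.foldl (fun o q => if q.1 = "unrolling" then some q.2 else o) none ps) = ou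
  generalize (List.foldl (fun o q => if q.1 = "fusion" then some q.2 else o) none ps) = of
  generalize (List.foldl (fun o q => if q.1 = "parallel" then some q.2 else o) none ps) = op
  cases ou <;> cases of <;> cases op <;> simp
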